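-- pv_equiv track=rewrite | github.com/sawander28/openbsd-rpi3-arm64 | src/format_hex.py | add_colon_every_second_char
-- ===== SOURCE A (Python) =====
-- def add_colon_every_second_char(input_string):
--     result = ""
--     L = len(input_string)
--     for i in range(L):
--         result += input_string[i]
--         if (i + 1) % 2 == 0 and i < L - 1:
--             result += ":"
--     return result
-- ===== SOURCE B (Python) =====
-- def add_colon_every_second_char(input_string):
--     chunks = [input_string[i:i+2] for i in range(0, len(input_string), 2)]
--     return ":".join(chunks)
-- ===== Notes on version B (the rewrite author's own statement) =====
-- stated objective: idiomatic
-- what changed: Replaces the char-by-char loop with a modulo-2 boundary check by slicing the string into 2-character chunks and joining them with ':'.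
import Mathlib
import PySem

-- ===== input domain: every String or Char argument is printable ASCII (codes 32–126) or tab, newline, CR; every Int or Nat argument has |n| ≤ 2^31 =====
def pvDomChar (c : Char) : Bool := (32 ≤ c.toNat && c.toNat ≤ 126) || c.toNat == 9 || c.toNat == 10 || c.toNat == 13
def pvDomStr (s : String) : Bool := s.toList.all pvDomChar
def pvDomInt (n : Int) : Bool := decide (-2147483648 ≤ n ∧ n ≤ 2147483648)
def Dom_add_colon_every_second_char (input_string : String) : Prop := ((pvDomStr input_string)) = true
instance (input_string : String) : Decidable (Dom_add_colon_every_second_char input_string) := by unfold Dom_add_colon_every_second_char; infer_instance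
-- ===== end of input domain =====

-- B groups the string into 2-character slices and joins them with ':' instead of
-- accumulating char-by-char with a modulo-2 boundary check; objective: idiomatic.

-- ===== PORT A =====
def add_colon_every_second_char (input_string : String) : String :=
  let cs := input_string.toList
  let L : Int := PySem.Chars.len cs
  String.ofList ((PySem.List.pyRange 0 L 1).foldl
    (fun result i =>
      let r := result ++ [PySem.List.pyGetD cs i ' ']
      if PySem.Int.mod (i + 1) 2 = 0 ∧ i < L - 1 then r ++ [':'] else r)
    [])

-- ===== PORT B =====
def add_colon_every_second_char_alt (input_string : String) : String :=
  let cs := input_string.toList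
  let chunks := (PySem.List.pyRange 0 (PySem.Chars.len cs) 2).map
    (fun i => PySem.List.slice cs (some i) (some (i + 2)))
  String.ofList (PySem.Chars.join [':'] chunks)

-- ===== PRECONDITION & SPEC =====
def Spec_add_colon_every_second_char (input_string : String) (out : String) : Prop := out = add_colon_every_second_char_alt input_string
instance (input_string : String) (out : String) : Decidable (Spec_add_colon_every_second_char input_string out) := by unfold Spec_add_colon_every_second_char; infer_instance

-- ===== CLAIM (what is proved, stated in full; the proofs are below) =====
def Claim_equal_add_colon_every_second_char : Prop := ∀ (input_string : String), Dom_add_colon_every_second_char input_string → Spec_add_colon_every_second_char input_string (add_colon_every_second_char input_string)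

-- ===== LEMMAS AND PROOFS =====

-- a step-2 range unfolds one element at the front
theorem pyRange_two_cons (a b : Int) (h : a < b) :
    PySem.List.pyRange a b 2 = a :: PySem.List.pyRange (a + 2) b 2 := by
  rw [PySem.List.pyRange_of_pos a b (by norm_num),
      PySem.List.pyRange_of_pos (a + 2) b (by norm_num)]
  by_cases h2 : a + 2 < b
  · have hcnt : ((b - a + 2 - 1) / 2).toNat = ((b - (a + 2) + 2 - 1) / 2).toNat + 1 := by omega
    simp only [if_pos h, if_pos h2, hcnt, List.range_succ_eq_map, List.map_cons, List.map_map]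
    congr 1
    · push_cast; ring
    · apply List.map_congr_left
      intro k _
      simp only [Function.comp_apply]
      push_cast
      ring
  · have hcnt : ((b - a + 2 - 1) / 2).toNat = 1 := by omega
    simp only [if_pos h, if_neg h2, hcnt]
    norm_num [List.range_succ]

-- shifting a step-1 range down by 2
theorem pyRange_one_shift2 (n' : Int) :
    PySem.List.pyRange 2 (n' + 2) 1 = (PySem.List.pyRange 0 n' 1).map (· + 2) := by
  rw [PySem.List.pyRange_one, PySem.List.pyRange_one]
  have h : (n' + 2 - 2).toNat = (n' - 0).toNat := by omega
  rw [h, List.map_map]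
  apply List.map_congr_left
  intro k _
  simp only [Function.comp_apply]
  ring

-- shifting a step-2 range down by 2
theorem pyRange_two_shift2 (n' : Int) :
    PySem.List.pyRange 2 (n' + 2) 2 = (PySem.List.pyRange 0 n' 2).map (· + 2) := by
  rw [PySem.List.pyRange_of_pos 2 (n' + 2) (by norm_num),
      PySem.List.pyRange_of_pos 0 n' (by norm_num)]
  have hif : (if (2:Int) < n' + 2 then ((n' + 2 - 2 + 2 - 1) / 2).toNat else 0)
      = (if (0:Int) < n' then ((n' - 0 + 2 - 1) / 2).toNat else 0) := by
    by_cases h : (0:Int) < n'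
    · rw [if_pos (by omega), if_pos h]; omega
    · rw [if_neg (by omega), if_neg h]
  rw [hif, List.map_map]
  apply List.map_congr_left
  intro k _
  simp only [Function.comp_apply]
  ring

-- core equivalence, on char lists
theorem core_eq : ∀ cs : List Char,
    List.flatMap (fun i => [PySem.List.pyGetD cs i ' '] ++
        (if PySem.Int.mod (i + 1) 2 = 0 ∧ i < (cs.length : Int) - 1 then [':'] else []))
      (PySem.List.pyRange 0 (cs.length : Int) 1)
    = PySem.Chars.join [':']
        ((PySem.List.pyRange 0 (cs.length : Int) 2).map
          (fun i => PySem.List.slice cs (some i) (some (i + 2))))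
  | [] => by decide
  | [a] => by
      have h1 : PySem.List.pyRange 0 (1 : Int) 1 = [0] := by decide
      have h2 : PySem.List.pyRange 0 (1 : Int) 2 = [0] := by decide
      simp [h1, h2, PySem.Chars.join_singleton, PySem.List.pyGetD_zero_cons,
        PySem.List.slice_toNat]
  | a :: b :: rest => by
      have IH := core_eq rest
      have hlen : ((a :: b :: rest).length : Int) = (rest.length : Int) + 2 := by
        push_cast [List.length_cons]; ring
      set n' : Int := (rest.length : Int) with hn'
      have hn'0 : 0 ≤ n' := by positivity
      -- unfold the step-1 range: 0, 1, then a shifted copy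
      have hr1 : PySem.List.pyRange 0 (n' + 2) 1
          = 0 :: 1 :: (PySem.List.pyRange 0 n' 1).map (· + 2) := by
        rw [PySem.List.pyRange_one_cons (by omega), PySem.List.pyRange_one_cons (by omega)]
        norm_num [pyRange_one_shift2 n']
      -- unfold the step-2 range: 0, then a shifted copy
      have hr2 : PySem.List.pyRange 0 (n' + 2) 2
          = 0 :: (PySem.List.pyRange 0 n' 2).map (· + 2) := by
        rw [pyRange_two_cons 0 (n' + 2) (by omega)]
        norm_num [pyRange_two_shift2 n']
      rw [hlen, hr1, hr2]
      have hm1 : ¬ (PySem.Int.mod (0 + 1) 2 = 0 ∧ (0:Int) < n' + 2 - 1) := by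
        intro h; exact absurd h.1 (by decide)
      have hm2 : PySem.Int.mod ((1:Int) + 1) 2 = 0 := by decide
      have hget1 : PySem.List.pyGetD (a :: b :: rest) (1:Int) ' ' = b := by
        have h1 : (1:Int) = ((1:Nat) : Int) := by norm_num
        rw [h1, PySem.List.pyGetD_natCast]
        rfl
      have hhead : PySem.List.slice (a :: b :: rest) (some 0) (some (0 + 2)) = [a, b] := by
        rw [PySem.List.slice_toNat _ (by norm_num) (by norm_num)]
        rfl
      -- shifted per-index block of cs = block of rest
      have hshift : ∀ k : Int, k ∈ PySem.List.pyRange 0 n' 1 →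
          ([PySem.List.pyGetD (a :: b :: rest) (k + 2) ' '] ++
            (if PySem.Int.mod (k + 2 + 1) 2 = 0 ∧ k + 2 < n' + 2 - 1 then [':'] else []))
          = ([PySem.List.pyGetD rest k ' '] ++
            (if PySem.Int.mod (k + 1) 2 = 0 ∧ k < n' - 1 then [':'] else [])) := by
        intro k hk
        have hk0 : 0 ≤ k := (PySem.List.mem_pyRange_one.mp hk).1
        have hg : PySem.List.pyGetD (a :: b :: rest) (k + 2) ' '
            = PySem.List.pyGetD rest k ' ' := by
          have h2 : k + 2 = ((k.toNat + 2 : Nat) : Int) := by omega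
          have h3 : k = ((k.toNat : Nat) : Int) := by omega
          rw [h2, PySem.List.pyGetD_natCast, h3, PySem.List.pyGetD_natCast]
          rfl
        have hc : (PySem.Int.mod (k + 2 + 1) 2 = 0 ∧ k + 2 < n' + 2 - 1)
            ↔ (PySem.Int.mod (k + 1) 2 = 0 ∧ k < n' - 1) := by
          rw [PySem.Int.mod_eq_emod_of_pos (by norm_num : (0:Int) < 2),
              PySem.Int.mod_eq_emod_of_pos (by norm_num : (0:Int) < 2)]
          omega
        rw [hg]
        by_cases h : PySem.Int.mod (k + 1) 2 = 0 ∧ k < n' - 1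
        · rw [if_pos (hc.mpr h), if_pos h]
        · rw [if_neg (fun hh => h (hc.mp hh)), if_neg h]
      -- shifted chunk of cs = chunk of rest
      have hchunk : ∀ i : Int, i ∈ PySem.List.pyRange 0 n' 2 →
          PySem.List.slice (a :: b :: rest) (some (i + 2)) (some (i + 2 + 2))
          = PySem.List.slice rest (some i) (some (i + 2)) := by
        intro i hi
        have hi0 : 0 ≤ i := by
          have := (PySem.List.mem_pyRange_iff_of_pos (by norm_num : (0:Int) < 2) i).mp hi
          omega
        rw [PySem.List.slice_toNat _ (by omega) (by omega),
            PySem.List.slice_toNat _ (by omega) (by omega)]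
        have h1 : (i + 2).toNat = i.toNat + 2 := by omega
        have h2 : (i + 2 + 2).toNat = i.toNat + 2 + 2 := by omega
        rw [h1, h2]
        simp only [List.drop_succ_cons]
        congr 1
        omega
      simp only [List.flatMap_cons, List.flatMap_map, List.map_cons, List.map_map,
        Function.comp_def]
      rw [List.flatMap_congr (fun k hk => hshift k hk), IH]
      rw [List.map_congr_left (fun i hi => hchunk i hi)]
      rw [if_neg hm1, hhead, PySem.List.pyGetD_zero_cons, hget1]
      rcases hrest : (PySem.List.pyRange 0 n' 2).map
          (fun i => PySem.List.slice rest (some i) (some (i + 2))) with _ | ⟨c0, crest⟩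
      · -- rest is empty: a single chunk, no separator
        have hn0 : n' ≤ 0 := by
          by_contra h
          rw [pyRange_two_cons 0 n' (by omega)] at hrest
          simp at hrest
        have hrnil : rest = [] := by
          have h0 : rest.length = 0 := by omega
          exact List.eq_nil_of_length_eq_zero h0
        rw [if_neg (fun h => absurd h.2 (by omega : ¬ ((1:Int) < n' + 2 - 1)))]
        rw [PySem.Chars.join_nil, PySem.Chars.join_singleton]
        simp
      · -- rest is non-empty: separator after the head chunk
        have hpos : 0 < n' := by
          by_contra h
          have hr0 : PySem.List.pyRange 0 n' 2 = [] := by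
            rw [PySem.List.pyRange_of_pos 0 n' (by norm_num), if_neg (by omega)]
            simp
          rw [hr0] at hrest
          simp at hrest
        rw [if_pos ⟨hm2, by omega⟩, PySem.Chars.join_cons_cons]
        simp

-- ===== VERDICT (by name: the statement is the Claim_ definition above) =====
theorem add_colon_every_second_char_spec : Claim_equal_add_colon_every_second_char := by
  intro s _
  unfold Spec_add_colon_every_second_char add_colon_every_second_char add_colon_every_second_char_alt
  simp only [PySem.Chars.len_eq]
  apply congrArg String.ofList
  refine Eq.trans (PySem.List.foldl_congr_mem _ _
      (fun (result : List Char) (i : Int) => result ++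
        ([PySem.List.pyGetD s.toList i ' '] ++
          if PySem.Int.mod (i + 1) 2 = 0 ∧ i < ((s.toList.length : Int)) - 1 then [':'] else []))
      [] ?_) ?_
  · intro acc x _
    show (if PySem.Int.mod (x + 1) 2 = 0 ∧ x < ((s.toList.length : Int)) - 1
        then (acc ++ [PySem.List.pyGetD s.toList x ' ']) ++ [':']
        else acc ++ [PySem.List.pyGetD s.toList x ' '])
      = acc ++ ([PySem.List.pyGetD s.toList x ' '] ++
          if PySem.Int.mod (x + 1) 2 = 0 ∧ x < ((s.toList.length : Int)) - 1 then [':'] else [])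
    by_cases h : PySem.Int.mod (x + 1) 2 = 0 ∧ x < ((s.toList.length : Int)) - 1
    · rw [if_pos h, if_pos h]; simp
    · rw [if_neg h, if_neg h]; simp
  · rw [PySem.List.foldl_append_eq_flatMap, List.nil_append]
    exact core_eq s.toList
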